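-- pv_equiv track=rewrite | github.com/EliTheCreator/AdventOfCode | 2015/day17/task2.py | rec
-- ===== SOURCE A (Python) =====
-- def rec(eggnog, containers, depth):
--     combinations = []
--     if containers:
--         combinations += rec(eggnog, containers[1:], depth)
--         leftEggnog = eggnog - containers[0]
--         if leftEggnog > 0:
--             combinations += rec(leftEggnog, containers[1:], depth + 1)
--         elif leftEggnog == 0:
--             combinations += [depth]
--
--     return combinations
-- ===== SOURCE B (Python) =====
-- def rec(eggnog, containers, depth):
--     # Memoized top-down DP keyed by (remaining, suffix length); entries store
--     # depth-relative counts, shifted by `depth` only at the end.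
--     memo = {}
--
--     def f(remaining, rest):
--         key = (remaining, len(rest))
--         if key in memo:
--             return memo[key]
--         if not rest:
--             res = []
--         else:
--             res = f(remaining, rest[1:])
--             left = remaining - rest[0]
--             if left > 0:
--                 res = res + [c + 1 for c in f(left, rest[1:])]
--             elif left == 0:
--                 res = res + [0]
--         memo[key] = res
--         return res
--
--     return [depth + c for c in f(eggnog, containers)]
-- ===== Notes on version B (the rewrite author's own statement) =====
-- stated objective: alternative
-- what changed: Replaces A's plain exponential recursion by a memoized top-down DP: a helper keyed by (remaining, suffix length) caches the list of depth-relative counts for each subproblem, and the final answer shifts that cached list by the depth offset once.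
import Mathlib
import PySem

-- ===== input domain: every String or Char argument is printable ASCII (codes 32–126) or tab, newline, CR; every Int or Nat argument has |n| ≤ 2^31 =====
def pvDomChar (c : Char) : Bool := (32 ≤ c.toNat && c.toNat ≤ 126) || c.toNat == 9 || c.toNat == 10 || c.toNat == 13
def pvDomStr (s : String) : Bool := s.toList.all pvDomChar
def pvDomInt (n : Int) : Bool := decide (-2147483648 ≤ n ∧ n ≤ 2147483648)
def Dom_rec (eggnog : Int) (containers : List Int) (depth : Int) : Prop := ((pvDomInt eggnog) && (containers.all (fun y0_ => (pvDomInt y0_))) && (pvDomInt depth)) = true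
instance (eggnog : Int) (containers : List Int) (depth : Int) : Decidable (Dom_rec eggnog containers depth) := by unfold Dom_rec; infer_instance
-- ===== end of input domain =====

-- B replaces A's plain recursion by a memoized top-down DP keyed by (remaining,
-- suffix length) holding depth-relative counts, shifted by depth once at the end
-- (objective: alternative; the output list itself can be large, so no speedup is claimed).

-- ===== PORT A =====
def rec (eggnog : Int) (containers : List Int) (depth : Int) : List Int :=
  match containers with
  | [] => []
  | c :: cs =>
    let combinations := rec eggnog cs depth
    let leftEggnog := eggnog - c
    if leftEggnog > 0 then
      combinations ++ rec leftEggnog cs (depth + 1)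
    else if leftEggnog = 0 then
      combinations ++ [depth]
    else
      combinations

-- ===== PORT B =====
-- helper f of Source B: state-passing memo dict, keyed by (remaining, len(rest))
def recAltF (remaining : Int) (rest : List Int)
    (memo : PySem.Dict (Int × Int) (List Int)) :
    List Int × PySem.Dict (Int × Int) (List Int) :=
  let key : Int × Int := (remaining, (rest.length : Int))
  match memo.get? key with
  | some v => (v, memo)
  | none =>
    match rest with
    | [] => (([] : List Int), memo.insert key [])
    | c :: cs =>
      let p := recAltF remaining cs memo
      let left := remaining - c
      if left > 0 then
        let q := recAltF left cs p.2
        let res := p.1 ++ q.1.map (· + 1)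
        (res, q.2.insert key res)
      else if left = 0 then
        let res := p.1 ++ [0]
        (res, p.2.insert key res)
      else
        (p.1, p.2.insert key p.1)

def rec_alt (eggnog : Int) (containers : List Int) (depth : Int) : List Int :=
  ((recAltF eggnog containers PySem.Dict.empty).1).map (fun c => depth + c)

-- ===== PRECONDITION & SPEC =====
def Spec_rec (eggnog : Int) (containers : List Int) (depth : Int) (out : List Int) : Prop := out = rec_alt eggnog containers depth
instance (eggnog : Int) (containers : List Int) (depth : Int) (out : List Int) : Decidable (Spec_rec eggnog containers depth out) := by unfold Spec_rec; infer_instance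

-- ===== CLAIM (what is proved, stated in full; the proofs are below) =====
def Claim_equal_rec : Prop := ∀ (eggnog : Int) (containers : List Int) (depth : Int), Dom_rec eggnog containers depth → Spec_rec eggnog containers depth (rec eggnog containers depth)

-- ===== LEMMAS AND PROOFS =====

-- pure specification: depth-relative counts of the valid subsets, in A's DFS order
def gSpec : Int → List Int → List Int
  | _, [] => []
  | e, c :: cs =>
    gSpec e cs ++
      (if e - c > 0 then (gSpec (e - c) cs).map (· + 1)
       else if e - c = 0 then [0] else [])

theorem rec_eq_gSpec (containers : List Int) :
    ∀ (eggnog depth : Int),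
      rec eggnog containers depth = (gSpec eggnog containers).map (fun c => depth + c) := by
  induction containers with
  | nil => intro e d; simp [rec, gSpec]
  | cons c cs ih =>
    intro e d
    simp only [rec, gSpec]
    split_ifs with h h0
    · rw [ih, ih, List.map_append, List.map_map]
      congr 1
      apply List.map_congr_left
      intro a _
      simp only [Function.comp_apply]
      ring
    · rw [ih]; simp
    · rw [ih]; simp

-- memo validity: every stored entry is gSpec of the unique suffix of cs0 with that length
def MemoOK (cs0 : List Int) (memo : PySem.Dict (Int × Int) (List Int)) : Prop :=
  ∀ (r : Int) (suffix : List Int) (v : List Int),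
    suffix <:+ cs0 →
    memo.get? (r, (suffix.length : Int)) = some v →
    v = gSpec r suffix

theorem suffix_eq_of_length {cs0 s t : List Int} (hs : s <:+ cs0) (ht : t <:+ cs0)
    (h : s.length = t.length) : s = t := by
  obtain ⟨u, hu⟩ := hs
  obtain ⟨w, hw⟩ := ht
  have heq : u ++ s = w ++ t := hu.trans hw.symm
  have hlen : u.length = w.length := by
    have := congrArg List.length heq
    simp at this
    omega
  exact (List.append_inj heq hlen).2

-- inserting the entry for `rest` (a suffix of cs0) with its gSpec value keeps the memo valid
theorem memoOK_insert {cs0 : List Int} {memo : PySem.Dict (Int × Int) (List Int)}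
    (hok : MemoOK cs0 memo) {r : Int} {rest : List Int} (hsuf : rest <:+ cs0) :
    MemoOK cs0 (memo.insert (r, (rest.length : Int)) (gSpec r rest)) := by
  intro r' s v hs hget'
  rw [PySem.Dict.get?_insert] at hget'
  split_ifs at hget' with hk
  · have hr : r' = r := congrArg Prod.fst hk
    have hs0 : s = rest := by
      apply suffix_eq_of_length hs hsuf
      have h2 : (s.length : Int) = (rest.length : Int) := congrArg Prod.snd hk
      exact_mod_cast h2
    subst hs0; subst hr
    exact (Option.some.inj hget').symm
  · exact hok r' s v hs hget'

theorem recAltF_correct (cs0 : List Int) :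
    ∀ (rest : List Int) (r : Int) (memo : PySem.Dict (Int × Int) (List Int)),
      rest <:+ cs0 → MemoOK cs0 memo →
      (recAltF r rest memo).1 = gSpec r rest ∧ MemoOK cs0 (recAltF r rest memo).2 := by
  intro rest
  induction rest with
  | nil =>
    intro r memo hsuf hok
    simp only [recAltF]
    split
    next v hget =>
      exact ⟨hok r [] v hsuf hget, hok⟩
    next hget =>
      refine ⟨by simp [gSpec], ?_⟩
      have := memoOK_insert hok (r := r) (rest := ([] : List Int)) hsuf
      simpa [gSpec] using this
  | cons c cs ih =>
    intro r memo hsuf hok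
    have hcs : cs <:+ cs0 := (List.suffix_cons c cs).trans hsuf
    simp only [recAltF]
    split
    next v hget =>
      exact ⟨hok r (c :: cs) v hsuf hget, hok⟩
    next hget =>
      obtain ⟨ha, hokA⟩ := ih r memo hcs hok
      split_ifs with h h0
      · obtain ⟨hb, hokB⟩ := ih (r - c) (recAltF r cs memo).2 hcs hokA
        have hres : (recAltF r cs memo).1 ++
            ((recAltF (r - c) cs (recAltF r cs memo).2).1).map (· + 1) = gSpec r (c :: cs) := by
          have h' : c < r := by omega
          rw [ha, hb]; simp [gSpec, h']
        refine ⟨hres, ?_⟩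
        have := memoOK_insert hokB (r := r) (rest := c :: cs) hsuf
        rw [← hres] at this
        exact this
      · have hres : (recAltF r cs memo).1 ++ [(0 : Int)] = gSpec r (c :: cs) := by
          rw [ha]; simp [gSpec, h0]
        refine ⟨hres, ?_⟩
        have := memoOK_insert hokA (r := r) (rest := c :: cs) hsuf
        rw [← hres] at this
        exact this
      · have hres : (recAltF r cs memo).1 = gSpec r (c :: cs) := by
          have h' : ¬ c < r := by omega
          rw [ha]; simp [gSpec, h', h0]
        refine ⟨hres, ?_⟩
        have := memoOK_insert hokA (r := r) (rest := c :: cs) hsuf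
        rw [← hres] at this
        exact this

theorem rec_alt_eq_gSpec (eggnog : Int) (containers : List Int) (depth : Int) :
    rec_alt eggnog containers depth = (gSpec eggnog containers).map (fun c => depth + c) := by
  unfold rec_alt
  have h := recAltF_correct containers containers eggnog PySem.Dict.empty
    (List.suffix_refl containers)
    (by intro r s v _ hget; simp [PySem.Dict.get?_empty] at hget)
  rw [h.1]

-- ===== VERDICT (by name: the statement is the Claim_ definition above) =====
theorem rec_spec : Claim_equal_rec := by
  intro e cs d _
  unfold Spec_rec
  rw [rec_eq_gSpec, rec_alt_eq_gSpec]
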